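-- pv_equiv track=rewrite | github.com/jamadeo/adventofcode | day_4/passport_processing.py | split_into_records
-- ===== SOURCE A (Python) =====
-- def split_into_records(lines):
--     record = set()
--     for line in lines:
--         stripped = line.strip()
--         if stripped == '':
--             yield record
--             record = set()
--         else:
--             record.update(entry.split(':')[0] for entry in stripped.split(' '))
--     yield record
-- ===== SOURCE B (Python) =====
-- def split_into_records(lines):
--     # Phase 1: group stripped lines into records separated by blank lines.
--     groups = [[]]
--     for line in lines:
--         s = line.strip()
--         if s == '':
--             groups.append([])
--         else:
--             groups[-1].append(s)
--     # Phase 2: the set of field keys of each group.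
--     for g in groups:
--         yield {entry.split(':')[0] for words in g for entry in words.split(' ')}
-- ===== Notes on version B (the rewrite author's own statement) =====
-- stated objective: alternative
-- what changed: B splits the work into two passes: a grouping pass collecting each record's stripped lines into plain lists, then a set-comprehension pass building each record's key set at once; A fuses grouping and key extraction into one stateful pass that incrementally updates a mutable set per line.
import Mathlib
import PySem

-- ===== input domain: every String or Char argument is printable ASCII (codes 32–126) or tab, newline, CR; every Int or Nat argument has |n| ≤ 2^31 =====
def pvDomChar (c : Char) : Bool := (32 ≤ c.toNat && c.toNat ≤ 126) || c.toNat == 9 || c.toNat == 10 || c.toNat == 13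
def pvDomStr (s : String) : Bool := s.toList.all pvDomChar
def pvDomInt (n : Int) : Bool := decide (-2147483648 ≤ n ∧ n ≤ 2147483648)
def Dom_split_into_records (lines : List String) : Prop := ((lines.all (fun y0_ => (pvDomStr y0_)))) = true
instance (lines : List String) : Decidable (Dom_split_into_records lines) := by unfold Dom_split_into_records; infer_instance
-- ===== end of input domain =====

-- B separates grouping (one pass collecting each record's stripped lines) from key
-- extraction (a second comprehension pass over the groups); A fuses both into one
-- stateful pass updating a mutable set per line. Objective: alternative decomposition.

-- ===== PORT A =====
-- the generator's yields are collected in order: each yield becomes a cons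
def split_into_records_go (lines : List String) (record : PySem.Set String) :
    List (List String) :=
  match lines with
  | [] => [record]
  | line :: rest =>
    let stripped := PySem.Str.strip line
    if stripped == "" then
      record :: split_into_records_go rest PySem.Set.empty
    else
      split_into_records_go rest
        (PySem.Set.update record
          (((PySem.Str.split? stripped " ").getD []).map
            (fun entry => ((PySem.Str.split? entry ":").getD []).headD "")))
      -- entry.split(':')[0]: split(':') is always nonempty, so [0] is its head

def split_into_records (lines : List String) : List (List String) :=
  split_into_records_go lines PySem.Set.empty

-- ===== PORT B =====
def split_into_records_alt (lines : List String) : List (List String) :=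
  -- phase 1: groups.append([]) on a blank line, else groups[-1].append(s)
  let groups := lines.foldl (fun gs line =>
      let s := PySem.Str.strip line
      if s == "" then gs ++ [[]]
      else gs.dropLast ++ [gs.getLastD [] ++ [s]]) [[]]
  -- phase 2: the set comprehension over each group
  groups.map (fun g =>
    PySem.Set.ofList (g.flatMap (fun words =>
      ((PySem.Str.split? words " ").getD []).map
        (fun entry => ((PySem.Str.split? entry ":").getD []).headD ""))))

-- ===== PRECONDITION & SPEC =====
def Spec_split_into_records (lines : List String) (out : List (List String)) : Prop := out = split_into_records_alt lines
instance (lines : List String) (out : List (List String)) : Decidable (Spec_split_into_records lines out) := by unfold Spec_split_into_records; infer_instance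

-- ===== CLAIM (what is proved, stated in full; the proofs are below) =====
def Claim_equal_split_into_records : Prop := ∀ (lines : List String), Dom_split_into_records lines → Spec_split_into_records lines (split_into_records lines)

-- ===== LEMMAS AND PROOFS =====

def pvKeys (s : String) : List String :=
  ((PySem.Str.split? s " ").getD []).map (fun entry => ((PySem.Str.split? entry ":").getD []).headD "")

def pvSetify (g : List String) : List String := PySem.Set.ofList (g.flatMap pvKeys)

-- reference grouping: F lines cur = the list of groups, cur being the (reversed-free)
-- current group already collected
def pvF (lines : List String) (cur : List String) : List (List String) :=
  match lines with
  | [] => [cur]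
  | line :: rest =>
    let s := PySem.Str.strip line
    if s == "" then cur :: pvF rest []
    else pvF rest (cur ++ [s])

lemma pvF_ne_nil (lines cur : List String) : pvF lines cur ≠ [] := by
  induction lines generalizing cur with
  | nil => simp [pvF]
  | cons l rest ih =>
    simp only [pvF]
    split
    · simp
    · exact ih _

lemma pvF_split (lines : List String) : ∀ cur,
    pvF lines cur = (cur ++ (pvF lines []).headD []) :: (pvF lines []).tail := by
  induction lines with
  | nil => intro cur; simp [pvF]
  | cons l rest ih =>
    intro cur
    simp only [pvF]
    by_cases h : PySem.Str.strip l == ""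
    · simp [h]
    · simp only [h, if_false]
      rw [ih (cur ++ [PySem.Str.strip l]), ih ([] ++ [PySem.Str.strip l])]
      simp

lemma pv_go_eq (lines : List String) : ∀ r : PySem.Set String,
    split_into_records_go lines r =
      match pvF lines [] with
      | g :: gs => PySem.Set.update r (g.flatMap pvKeys) :: gs.map pvSetify
      | [] => [] := by
  induction lines with
  | nil => intro r; simp [split_into_records_go, pvF, PySem.Set.update]
  | cons line rest ih =>
    intro r
    simp only [split_into_records_go, pvF]
    by_cases h : PySem.Str.strip line == ""
    · simp only [h, if_true]
      rw [ih]
      cases hg : pvF rest [] with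
      | nil => exact absurd hg (pvF_ne_nil rest [])
      | cons g gs =>
        simp [pvSetify, PySem.Set.empty, PySem.Set.update, PySem.Set.ofList_eq_foldl]
    · simp only [h, Bool.false_eq_true, if_false]
      rw [pvF_split rest ([] ++ [PySem.Str.strip line])]
      cases hg : pvF rest [] with
      | nil => exact absurd hg (pvF_ne_nil rest [])
      | cons g gs =>
        rw [ih, hg]
        simp [pvKeys, PySem.Set.update, List.foldl_append]

lemma pv_foldl_eq (lines : List String) : ∀ (acc : List (List String)) (cur : List String),
    lines.foldl (fun gs line =>
      let s := PySem.Str.strip line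
      if s == "" then gs ++ [[]]
      else gs.dropLast ++ [gs.getLastD [] ++ [s]]) (acc ++ [cur]) = acc ++ pvF lines cur := by
  induction lines with
  | nil => intro acc cur; simp [pvF]
  | cons l rest ih =>
    intro acc cur
    simp only [List.foldl, pvF]
    by_cases h : PySem.Str.strip l == ""
    · simp only [h, if_true]
      rw [show (acc ++ [cur]) ++ [[]] = (acc ++ [cur]) ++ [([] : List String)] from rfl]
      rw [ih (acc ++ [cur]) []]
      simp
    · simp only [h, Bool.false_eq_true, if_false]
      have h1 : (acc ++ [cur]).dropLast = acc := by simp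
      have h2 : (acc ++ [cur]).getLastD [] = cur := by simp
      rw [h1, h2, ih acc (cur ++ [PySem.Str.strip l])]

theorem split_into_records_spec : Claim_equal_split_into_records := by
  intro lines _
  unfold Spec_split_into_records split_into_records split_into_records_alt
  rw [pv_go_eq]
  have := pv_foldl_eq lines [] []
  simp only [List.nil_append] at this
  rw [this]
  cases hg : pvF lines [] with
  | nil => exact absurd hg (pvF_ne_nil lines [])
  | cons g gs =>
    have hfun : (fun g : List String => PySem.Set.ofList (g.flatMap (fun words =>
        ((PySem.Str.split? words " ").getD []).map
          (fun entry => ((PySem.Str.split? entry ":").getD []).headD "")))) = pvSetify := rfl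
    rw [hfun]
    simp [pvSetify, PySem.Set.empty, PySem.Set.update, PySem.Set.ofList_eq_foldl]
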